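-- pv_equiv track=rewrite | github.com/EDEAI/OpenFlux | check_gmail_fixed.py | get_priority_level
-- ===== SOURCE A (Python) =====
-- def get_priority_level(subject, sender):
--     subject_lower = subject.lower()
--     sender_lower = sender.lower()
--     text = subject_lower + " " + sender_lower
--
--     if any(k in text for k in ["security alert", "suspicious", "password changed", "login attempt", "unauthorized", "account locked", "urgent payment", "fraud alert", "verification"]):
--         return "P0"
--     if any(k in text for k in ["invoice", "payment due", "contract", "business proposal", "partnership", "system notification", "server down", "purchase order", "billing"]):
--         return "P1"
--     if any(k in text for k in ["meeting", "project update", "report", "schedule", "deadline", "review"]):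
--         return "P2"
--     return "P3"
-- ===== SOURCE B (Python) =====
-- _KEYWORD_LEVELS = {
--     "security alert": 0, "suspicious": 0, "password changed": 0,
--     "login attempt": 0, "unauthorized": 0, "account locked": 0,
--     "urgent payment": 0, "fraud alert": 0, "verification": 0,
--     "invoice": 1, "payment due": 1, "contract": 1, "business proposal": 1,
--     "partnership": 1, "system notification": 1, "server down": 1,
--     "purchase order": 1, "billing": 1,
--     "meeting": 2, "project update": 2, "report": 2, "schedule": 2,
--     "deadline": 2, "review": 2,
-- }
--
--
-- def get_priority_level(subject, sender):
--     text = subject.lower() + " " + sender.lower()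
--     levels = [level for kw, level in _KEYWORD_LEVELS.items() if kw in text]
--     return "P" + str(min(levels, default=3))
-- ===== Notes on version B (the rewrite author's own statement) =====
-- stated objective: alternative
-- what changed: Replaces the four ordered short-circuiting tier guards with a single flat keyword->level table scanned once, reducing the levels of all matched keywords to their minimum (default 3).
import Mathlib
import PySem

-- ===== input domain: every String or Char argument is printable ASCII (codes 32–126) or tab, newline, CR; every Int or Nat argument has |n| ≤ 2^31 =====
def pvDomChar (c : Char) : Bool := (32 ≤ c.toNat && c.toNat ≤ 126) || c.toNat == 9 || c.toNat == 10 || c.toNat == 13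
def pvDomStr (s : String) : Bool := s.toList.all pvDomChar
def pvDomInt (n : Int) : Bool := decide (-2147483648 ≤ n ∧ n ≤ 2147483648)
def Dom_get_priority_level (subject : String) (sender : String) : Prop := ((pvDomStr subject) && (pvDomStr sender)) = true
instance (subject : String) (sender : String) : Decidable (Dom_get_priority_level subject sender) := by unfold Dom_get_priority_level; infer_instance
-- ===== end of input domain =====

-- B replaces A's four ordered short-circuiting tier guards by one flat keyword→level
-- table reduced to the minimum matched level (alternative decomposition, same cost).

-- ===== PORT A =====
def tierP0 : List String := ["security alert", "suspicious", "password changed", "login attempt", "unauthorized", "account locked", "urgent payment", "fraud alert", "verification"]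
def tierP1 : List String := ["invoice", "payment due", "contract", "business proposal", "partnership", "system notification", "server down", "purchase order", "billing"]
def tierP2 : List String := ["meeting", "project update", "report", "schedule", "deadline", "review"]

def get_priority_level (subject : String) (sender : String) : String :=
  let subject_lower := PySem.Str.lower subject
  let sender_lower := PySem.Str.lower sender
  let text := subject_lower ++ " " ++ sender_lower
  if tierP0.any (fun k => PySem.Str.isIn k text) then "P0"
  else if tierP1.any (fun k => PySem.Str.isIn k text) then "P1"
  else if tierP2.any (fun k => PySem.Str.isIn k text) then "P2"
  else "P3"

-- ===== PORT B =====
-- the module-level dict _KEYWORD_LEVELS of Source B, as an association list in insertion order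
def kwLevels : List (String × Int) :=
  [("security alert", 0), ("suspicious", 0), ("password changed", 0),
   ("login attempt", 0), ("unauthorized", 0), ("account locked", 0),
   ("urgent payment", 0), ("fraud alert", 0), ("verification", 0),
   ("invoice", 1), ("payment due", 1), ("contract", 1), ("business proposal", 1),
   ("partnership", 1), ("system notification", 1), ("server down", 1),
   ("purchase order", 1), ("billing", 1),
   ("meeting", 2), ("project update", 2), ("report", 2), ("schedule", 2),
   ("deadline", 2), ("review", 2)]

def get_priority_level_alt (subject : String) (sender : String) : String :=
  let text := PySem.Str.lower subject ++ " " ++ PySem.Str.lower sender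
  let levels := (kwLevels.filter (fun p => PySem.Str.isIn p.1 text)).map (fun p => p.2)
  "P" ++ PySem.Int.toStr (PySem.List.minD levels (fun x => x) 3)

-- ===== PRECONDITION & SPEC =====
def Spec_get_priority_level (subject : String) (sender : String) (out : String) : Prop := out = get_priority_level_alt subject sender
instance (subject : String) (sender : String) (out : String) : Decidable (Spec_get_priority_level subject sender out) := by unfold Spec_get_priority_level; infer_instance

-- ===== CLAIM (what is proved, stated in full; the proofs are below) =====
def Claim_equal_get_priority_level : Prop := ∀ (subject : String) (sender : String), Dom_get_priority_level subject sender → Spec_get_priority_level subject sender (get_priority_level subject sender)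

-- ===== LEMMAS AND PROOFS =====

theorem kwLevels_split :
    kwLevels = tierP0.map (fun k => (k, (0:Int))) ++ tierP1.map (fun k => (k, (1:Int)))
      ++ tierP2.map (fun k => (k, (2:Int))) := rfl

theorem minD_levels (t : String) :
    PySem.List.minD ((kwLevels.filter (fun p => PySem.Str.isIn p.1 t)).map (fun p => p.2)) (fun x => x) 3 =
    (if tierP0.any (fun k => PySem.Str.isIn k t) then 0
     else if tierP1.any (fun k => PySem.Str.isIn k t) then 1
     else if tierP2.any (fun k => PySem.Str.isIn k t) then 2 else 3) := by
  set L := (kwLevels.filter (fun p => PySem.Str.isIn p.1 t)).map (fun p => p.2) with hL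
  have hmemL : ∀ m ∈ L, (m = 0 ∧ tierP0.any (fun k => PySem.Str.isIn k t) = true)
      ∨ (m = 1 ∧ tierP1.any (fun k => PySem.Str.isIn k t) = true)
      ∨ (m = 2 ∧ tierP2.any (fun k => PySem.Str.isIn k t) = true) := by
    intro m hm
    simp only [hL, kwLevels_split, List.mem_map, List.mem_filter, List.mem_append,
      List.any_eq_true] at hm ⊢
    rcases hm with ⟨⟨k, v⟩, ⟨hk, hkin⟩, hv⟩
    rcases hk with (⟨x, hx, he⟩ | ⟨x, hx, he⟩) | ⟨x, hx, he⟩ <;>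
      (rw [Prod.mk.injEq] at he; obtain ⟨rfl, rfl⟩ := he) <;> subst hv
    · exact Or.inl ⟨rfl, x, hx, hkin⟩
    · exact Or.inr (Or.inl ⟨rfl, x, hx, hkin⟩)
    · exact Or.inr (Or.inr ⟨rfl, x, hx, hkin⟩)
  have hin : ∀ (c : Int) (g : List String), (∀ k ∈ g, (k, c) ∈ kwLevels) →
      g.any (fun k => PySem.Str.isIn k t) = true → c ∈ L := by
    intro c g hg ha
    rcases List.any_eq_true.mp ha with ⟨k, hk, hkt⟩
    simp only [hL, List.mem_map, List.mem_filter]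
    exact ⟨(k, c), ⟨hg k hk, hkt⟩, rfl⟩
  have hminD : PySem.List.minD L (fun x => x) 3 = (PySem.List.min? L (fun x => x)).getD 3 := rfl
  have hget : ∀ (c : Int), c ∈ L → (∀ m ∈ L, c ≤ m) →
      (PySem.List.min? L (fun x => x)).getD 3 = c := by
    intro c hc hle
    cases hm : PySem.List.min? L (fun x => x) with
    | none => exact absurd ((PySem.List.min?_eq_none_iff L _).mp hm ▸ hc) (List.not_mem_nil)
    | some m =>
      have h1 := PySem.List.min?_isMin hm c hc
      have h2 := hle m (PySem.List.min?_mem hm)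
      simp [le_antisymm h1 h2]
  split_ifs with h0 h1 h2
  · refine hminD.trans (hget 0 (hin 0 tierP0 (by intro k hk; rw [kwLevels_split]; simp [hk]) h0) ?_)
    intro m hm; rcases hmemL m hm with ⟨he, _⟩ | ⟨he, _⟩ | ⟨he, _⟩ <;> omega
  · refine hminD.trans (hget 1 (hin 1 tierP1 (by intro k hk; rw [kwLevels_split]; simp [hk]) h1) ?_)
    intro m hm
    rcases hmemL m hm with ⟨_, ha⟩ | ⟨he, _⟩ | ⟨he, _⟩
    · exact absurd ha h0
    · omega
    · omega
  · refine hminD.trans (hget 2 (hin 2 tierP2 (by intro k hk; rw [kwLevels_split]; simp [hk]) h2) ?_)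
    intro m hm
    rcases hmemL m hm with ⟨_, ha⟩ | ⟨_, ha⟩ | ⟨he, _⟩
    · exact absurd ha h0
    · exact absurd ha h1
    · omega
  · have hnil : L = [] := by
      apply List.eq_nil_iff_forall_not_mem.mpr
      intro m hm
      rcases hmemL m hm with ⟨_, ha⟩ | ⟨_, ha⟩ | ⟨_, ha⟩
      · exact h0 ha
      · exact h1 ha
      · exact h2 ha
    rw [hnil]; rfl

theorem guards_eq_table (t : String) :
    (if tierP0.any (fun k => PySem.Str.isIn k t) then "P0"
     else if tierP1.any (fun k => PySem.Str.isIn k t) then "P1"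
     else if tierP2.any (fun k => PySem.Str.isIn k t) then "P2"
     else "P3")
    = "P" ++ PySem.Int.toStr (PySem.List.minD
        ((kwLevels.filter (fun p => PySem.Str.isIn p.1 t)).map (fun p => p.2)) (fun x => x) 3) := by
  rw [minD_levels]
  split_ifs <;> decide

-- ===== VERDICT (by name: the statement is the Claim_ definition above) =====
theorem get_priority_level_spec : Claim_equal_get_priority_level := by
  intro subject sender _
  exact guards_eq_table (PySem.Str.lower subject ++ " " ++ PySem.Str.lower sender)
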